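-- pv_equiv track=rewrite | github.com/mikhailchizhmar/Algorithms_Yandex | hw6/G_square.py | find_max_width
-- ===== SOURCE A (Python) =====
-- def find_max_width(n, m, t):
--     left, right = 0, (min(n, m) - 1) // 2
--     while left < right:
--         mid = (left + right + 1) // 2
--         n_tiles = n * m - (n - 2 * mid) * (m - 2 * mid)
--         # this also works:
--         # n_tiles = mid * (2 * n + 2 * m - 4 * mid)
--         if n_tiles <= t:
--             left = mid
--         else:
--             right = mid - 1
--     return left
-- ===== SOURCE B (Python) =====
-- def find_max_width(n, m, t):
--     # Simpler linear forward scan over the monotone tile count instead of binary search.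
--     r = (min(n, m) - 1) // 2
--     ans = 0
--     mid = 1
--     while mid <= r:
--         if mid * (2 * n + 2 * m - 4 * mid) <= t:
--             ans = mid
--             mid += 1
--         else:
--             break
--     return ans
-- ===== Notes on version B (the rewrite author's own statement) =====
-- stated objective: simpler
-- what changed: Replaces the binary search over the border width with a plain forward scan that raises the answer while the (monotonically increasing) tile count stays within t and breaks at the first failure.
import Mathlib
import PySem

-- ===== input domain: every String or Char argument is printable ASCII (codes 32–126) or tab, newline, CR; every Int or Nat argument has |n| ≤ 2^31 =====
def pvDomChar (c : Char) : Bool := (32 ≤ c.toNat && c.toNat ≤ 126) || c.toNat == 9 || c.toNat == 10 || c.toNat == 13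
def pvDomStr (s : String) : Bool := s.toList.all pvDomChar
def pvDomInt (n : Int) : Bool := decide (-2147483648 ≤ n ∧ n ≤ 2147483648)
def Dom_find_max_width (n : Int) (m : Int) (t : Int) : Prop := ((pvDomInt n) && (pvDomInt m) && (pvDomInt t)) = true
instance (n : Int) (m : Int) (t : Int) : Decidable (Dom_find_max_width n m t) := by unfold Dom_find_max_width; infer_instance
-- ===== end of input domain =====

-- B replaces A's binary search by a simpler forward scan over the monotone tile count; same value everywhere.

-- ===== PORT A =====
-- the while-loop of A, recursion on the shrinking interval [left, right]
def loopA_find_max_width (n m t left right : Int) : Int :=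
  if _h : left < right then
    let mid := PySem.Int.floordiv (left + right + 1) 2
    let n_tiles := n * m - (n - 2 * mid) * (m - 2 * mid)
    if n_tiles ≤ t then loopA_find_max_width n m t mid right
    else loopA_find_max_width n m t left (mid - 1)
  else left
termination_by (right - left).toNat
decreasing_by
  · rw [PySem.Int.floordiv_eq_ediv_of_pos (by omega)]; omega
  · rw [PySem.Int.floordiv_eq_ediv_of_pos (by omega)]; omega

def find_max_width (n : Int) (m : Int) (t : Int) : Int :=
  loopA_find_max_width n m t 0 (PySem.Int.floordiv (min n m - 1) 2)

-- ===== PORT B =====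
-- the while-loop of B: raise ans while the tile count fits, break at the first failure
def loopB_find_max_width (n m t r mid ans : Int) : Int :=
  if _h : mid ≤ r then
    if mid * (2 * n + 2 * m - 4 * mid) ≤ t then
      loopB_find_max_width n m t r (mid + 1) mid
    else ans
  else ans
termination_by (r + 1 - mid).toNat
decreasing_by omega

def find_max_width_alt (n : Int) (m : Int) (t : Int) : Int :=
  loopB_find_max_width n m t (PySem.Int.floordiv (min n m - 1) 2) 1 0

-- ===== PRECONDITION & SPEC =====
def Spec_find_max_width (n : Int) (m : Int) (t : Int) (out : Int) : Prop := out = find_max_width_alt n m t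
instance (n : Int) (m : Int) (t : Int) (out : Int) : Decidable (Spec_find_max_width n m t out) := by unfold Spec_find_max_width; infer_instance

-- ===== CLAIM (what is proved, stated in full; the proofs are below) =====
def Claim_equal_find_max_width : Prop := ∀ (n : Int) (m : Int) (t : Int), Dom_find_max_width n m t → Spec_find_max_width n m t (find_max_width n m t)

-- ===== LEMMAS AND PROOFS =====

-- tile count of a border of width k (A's expression; B's is the ring-equal k*(2n+2m-4k))
def pvTiles (n m k : Int) : Int := n * m - (n - 2 * k) * (m - 2 * k)

theorem pvTiles_eq (n m k : Int) : n * m - (n - 2 * k) * (m - 2 * k) = pvTiles n m k := rfl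

theorem pvTiles_eq' (n m k : Int) : k * (2 * n + 2 * m - 4 * k) = pvTiles n m k := by
  unfold pvTiles; ring

-- the common characterisation of the result, for R = (min n m - 1) // 2
def pvGood (n m t R a : Int) : Prop :=
  0 ≤ a ∧ a ≤ R ∧ (a = 0 ∨ pvTiles n m a ≤ t) ∧ (a = R ∨ ¬ pvTiles n m (a + 1) ≤ t)

theorem loopA_inv (n m t R : Int) :
    ∀ (fuel : ℕ) (left right : Int), (right - left).toNat ≤ fuel →
      0 ≤ left → left ≤ right → right ≤ R →
      (left = 0 ∨ pvTiles n m left ≤ t) →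
      (right = R ∨ ¬ pvTiles n m (right + 1) ≤ t) →
      pvGood n m t R (loopA_find_max_width n m t left right) := by
  intro fuel
  induction fuel with
  | zero =>
    intro left right hf h0 hlr hR hL hRr
    have : left = right := by omega
    rw [loopA_find_max_width]
    simp only [show ¬ left < right by omega, dite_false]
    subst this
    exact ⟨h0, hR, hL, hRr⟩
  | succ k ih =>
    intro left right hf h0 hlr hR hL hRr
    rw [loopA_find_max_width]
    by_cases hlt : left < right
    · simp only [hlt, dite_true]
      have hmid : left < PySem.Int.floordiv (left + right + 1) 2 ∧
          PySem.Int.floordiv (left + right + 1) 2 ≤ right := by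
        rw [PySem.Int.floordiv_eq_ediv_of_pos (by omega)]; omega
      set mid := PySem.Int.floordiv (left + right + 1) 2 with hmiddef
      by_cases htile : n * m - (n - 2 * mid) * (m - 2 * mid) ≤ t
      · simp only [htile, if_true]
        exact ih mid right (by omega) (by omega) (by omega) hR
          (Or.inr (by rwa [pvTiles_eq] at htile)) hRr
      · simp only [htile, if_false]
        exact ih left (mid - 1) (by omega) h0 (by omega) (by omega) hL
          (Or.inr (by rw [show mid - 1 + 1 = mid by ring]; rwa [pvTiles_eq] at htile))
    · simp only [hlt, dite_false]
      have : left = right := by omega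
      subst this
      exact ⟨h0, hR, hL, hRr⟩

theorem loopB_inv (n m t R : Int) :
    ∀ (fuel : ℕ) (mid ans : Int), (R + 1 - mid).toNat ≤ fuel →
      1 ≤ mid → mid ≤ R + 1 → ans = mid - 1 →
      (ans = 0 ∨ pvTiles n m ans ≤ t) →
      pvGood n m t R (loopB_find_max_width n m t R mid ans) := by
  intro fuel
  induction fuel with
  | zero =>
    intro mid ans hf h1 hR hans hA
    have : mid = R + 1 := by omega
    rw [loopB_find_max_width]
    simp only [show ¬ mid ≤ R by omega, dite_false]
    exact ⟨by omega, by omega, hA, Or.inl (by omega)⟩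
  | succ k ih =>
    intro mid ans hf h1 hR hans hA
    rw [loopB_find_max_width]
    by_cases hle : mid ≤ R
    · simp only [hle, dite_true]
      by_cases htile : mid * (2 * n + 2 * m - 4 * mid) ≤ t
      · simp only [htile, if_true]
        exact ih (mid + 1) mid (by omega) (by omega) (by omega) (by ring)
          (Or.inr (by rwa [pvTiles_eq'] at htile))
      · simp only [htile, if_false]
        refine ⟨by omega, by omega, hA, Or.inr ?_⟩
        rw [show ans + 1 = mid by omega]
        rwa [pvTiles_eq'] at htile
    · simp only [hle, dite_false]
      exact ⟨by omega, by omega, hA, Or.inl (by omega)⟩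

-- monotonicity of the tile count on [1, R] when 2*R ≤ min n m - 1
theorem pvTiles_mono (n m R i j : Int) (hmin : 2 * R ≤ min n m - 1)
    (h1 : 1 ≤ i) (hij : i ≤ j) (hjR : j ≤ R) : pvTiles n m i ≤ pvTiles n m j := by
  have hn : min n m ≤ n := min_le_left _ _
  have hm : min n m ≤ m := min_le_right _ _
  have hfac : 0 ≤ 2 * n + 2 * m - 4 * i - 4 * j := by omega
  have := mul_nonneg (show (0:Int) ≤ j - i by omega) hfac
  have heq : pvTiles n m j - pvTiles n m i = (j - i) * (2 * n + 2 * m - 4 * i - 4 * j) := by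
    unfold pvTiles; ring
  omega

theorem pvGood_unique (n m t R a b : Int) (hmin : 2 * R ≤ min n m - 1)
    (ha : pvGood n m t R a) (hb : pvGood n m t R b) : a = b := by
  obtain ⟨ha0, haR, haL, haU⟩ := ha
  obtain ⟨hb0, hbR, hbL, hbU⟩ := hb
  by_contra hne
  rcases lt_or_gt_of_ne hne with hlt | hlt
  · have hA1 : ¬ pvTiles n m (a + 1) ≤ t := by rcases haU with h | h; omega; exact h
    have hBle : pvTiles n m b ≤ t := by rcases hbL with h | h; omega; exact h
    have := pvTiles_mono n m R (a + 1) b hmin (by omega) (by omega) (by omega)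
    omega
  · have hB1 : ¬ pvTiles n m (b + 1) ≤ t := by rcases hbU with h | h; omega; exact h
    have hAle : pvTiles n m a ≤ t := by rcases haL with h | h; omega; exact h
    have := pvTiles_mono n m R (b + 1) a hmin (by omega) (by omega) (by omega)
    omega

-- ===== VERDICT (by name: the statement is the Claim_ definition above) =====
theorem find_max_width_spec : Claim_equal_find_max_width := by
  intro n m t _
  unfold Spec_find_max_width find_max_width find_max_width_alt
  set R := PySem.Int.floordiv (min n m - 1) 2 with hRdef
  have hRb : 2 * R ≤ min n m - 1 ∧ min n m - 1 < 2 * R + 2 := by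
    rw [hRdef, PySem.Int.floordiv_eq_ediv_of_pos (by omega)]; omega
  by_cases hpos : 0 < R
  · have hA := loopA_inv n m t R (R - 0).toNat 0 R le_rfl (le_refl 0) (by omega) le_rfl
      (Or.inl rfl) (Or.inl rfl)
    have hB := loopB_inv n m t R (R + 1 - 1).toNat 1 0 le_rfl le_rfl (by omega) (by ring)
      (Or.inl rfl)
    exact pvGood_unique n m t R _ _ hRb.1 hA hB
  · rw [loopA_find_max_width, loopB_find_max_width]
    simp only [show ¬ (0:Int) < R by omega, show ¬ (1:Int) ≤ R by omega, dite_false]
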